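-- pv_equiv track=rewrite | github.com/NickWaterton/Unifi-websocket-interface | unifi.py | decode_layout
-- ===== SOURCE A (Python) =====
-- from collections import OrderedDict
--
-- def decode_layout(layout):
--     diagram = OrderedDict()
--     for row, port in enumerate(layout):
--         ports = port.split(' ')
--         diagram[row] = []
--         for index, p in enumerate(ports):
--             if row > 0:
--                 if diagram[row-1][index] == -1 and p.isdigit():
--                     diagram[row-1][index] = -2  #set port as empty port space, not separator
--             diagram[row].append(int(p) if p.isdigit() else -1)
--
--     return diagram
-- ===== SOURCE B (Python) =====
-- from collections import OrderedDict
--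
-- def _cell(p, below):
--     # A cell's final value depends only on its own token and the token directly below it:
--     # a digit token is its number; a non-digit token is -2 (empty port space) when a port
--     # number sits directly below it, else -1 (separator).
--     if p.isdigit():
--         return int(p)
--     return -2 if below is not None and below.isdigit() else -1
--
-- def decode_layout(layout):
--     toks = [line.split(' ') for line in layout]
--     out = OrderedDict()
--     for r, cur in enumerate(toks):
--         below = toks[r + 1] if r + 1 < len(toks) else []
--         out[r] = [_cell(p, below[i] if i < len(below) else None) for i, p in enumerate(cur)]
--     return out
-- ===== Notes on version B (the rewrite author's own statement) =====
-- stated objective: simpler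
-- what changed: A builds the dict while mutating the previous row's entry in a nested loop (back-patching -1 to -2 when a digit appears below); B does no mutation and no back-patching at all: each cell's final value is computed exactly once by a local rule from its own token and the token directly below it.
import Mathlib
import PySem

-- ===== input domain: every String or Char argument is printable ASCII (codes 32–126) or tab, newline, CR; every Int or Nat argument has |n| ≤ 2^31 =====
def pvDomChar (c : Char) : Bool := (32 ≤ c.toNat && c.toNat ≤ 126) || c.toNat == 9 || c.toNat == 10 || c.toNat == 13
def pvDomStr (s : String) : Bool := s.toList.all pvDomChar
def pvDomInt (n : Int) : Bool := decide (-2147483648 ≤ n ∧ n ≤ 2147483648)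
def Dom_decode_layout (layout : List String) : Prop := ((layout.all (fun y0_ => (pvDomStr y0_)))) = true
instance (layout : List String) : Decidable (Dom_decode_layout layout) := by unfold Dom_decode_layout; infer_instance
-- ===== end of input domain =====

-- A back-patches the previous row's dict entry while scanning; B never mutates: each cell is
-- computed once by a local rule from its own token and the token directly below it (objective: simpler).
-- Both return-value equal on Pre_; where a row splits into more tokens than the row above, A raises
-- IndexError (excluded by Pre_) while B returns the naturally decoded grid.

-- `int(p) if p.isdigit() else -1`, as appended by A.  Python guarantees int(p)
-- succeeds when p.isdigit() on the ASCII domain, so the `.getD 0` default is unreachable there.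
def pvTok (p : String) : Int :=
  if PySem.Str.strIsdigit p then (PySem.Int.ofStr? p).getD 0 else -1

-- ===== PORT A =====
-- body of A's inner `for index, p in enumerate(ports)` loop (row fixed).
-- `diagram[row-1][index]` read / write are exact where Python returns; where Python raises
-- IndexError (index out of range, excluded by Pre_) the read defaults and the write is a no-op.
def pvStepTok (row : Int) (d : PySem.Dict Int (List Int)) (ip : Int × String) :
    PySem.Dict Int (List Int) :=
  let d :=
    if row > 0 then
      if (PySem.List.pyGet? (d.getD (row - 1) []) ip.1).getD 0 = -1 ∧ PySem.Str.strIsdigit ip.2 then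
        d.modify (row - 1) [] (fun l => l.set ip.1.toNat (-2))
      else d
    else d
  d.modify row [] (fun l => l ++ [pvTok ip.2])

-- body of A's outer `for row, port in enumerate(layout)` loop.
def pvStepRow (d : PySem.Dict Int (List Int)) (rp : Int × String) : PySem.Dict Int (List Int) :=
  let ports := (PySem.Str.split? rp.2 " ").getD []
  let d := d.insert rp.1 []
  (PySem.List.enumerate ports).foldl (pvStepTok rp.1) d

def decode_layout (layout : List String) : List (Int × List Int) :=
  ((PySem.List.enumerate layout).foldl pvStepRow PySem.Dict.empty).items

-- ===== PORT B =====
-- Source B's `_cell(p, below)`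
def pvCellB (p : String) (below : Option String) : Int :=
  if PySem.Str.strIsdigit p then (PySem.Int.ofStr? p).getD 0
  else if (match below with | some q => PySem.Str.strIsdigit q | none => false) then -2
  else -1

-- Source B: build `toks`, then for each row compute its cells from the row below, no mutation.
def decode_layout_alt (layout : List String) : List (Int × List Int) :=
  let toks := layout.map (fun line => (PySem.Str.split? line " ").getD [])
  (PySem.List.enumerate toks).map (fun rp =>
    let below := if rp.1 + 1 < (toks.length : Int) then (PySem.List.pyGet? toks (rp.1 + 1)).getD [] else []
    (rp.1, (PySem.List.enumerate rp.2).map (fun ip =>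
      pvCellB ip.2 (if ip.1 < (below.length : Int) then PySem.List.pyGet? below ip.1 else none))))

-- ===== PRECONDITION & SPEC =====
def pvRowLen (s : String) : Nat := ((PySem.Str.split? s " ").getD []).length

-- Pre_ excludes exactly the inputs on which Python A raises IndexError: a row whose
-- space-split has more tokens than the row directly above it.
def Pre_decode_layout (layout : List String) : Prop :=
  List.IsChain (fun s t => pvRowLen t ≤ pvRowLen s) layout
instance (layout : List String) : Decidable (Pre_decode_layout layout) := by
  unfold Pre_decode_layout; infer_instance

def pvWitness_decode_layout : List String := ["1 2 x", "x 3", ""]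

def Spec_decode_layout (layout : List String) (out : List (Int × List Int)) : Prop :=
  out = decode_layout_alt layout
instance (layout : List String) (out : List (Int × List Int)) :
    Decidable (Spec_decode_layout layout out) := by unfold Spec_decode_layout; infer_instance

-- ===== CLAIM (what is proved, stated in full; the proofs are below) =====
def Claim_equal_decode_layout : Prop :=
  ∀ (layout : List String), Dom_decode_layout layout → Pre_decode_layout layout →
    Spec_decode_layout layout (decode_layout layout)

-- ===== LEMMAS AND PROOFS =====

-- tokens of one row, as values
def pvRowVals (line : String) : List Int := ((PySem.Str.split? line " ").getD []).map pvTok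

-- the common model: patch prev against the row below it
def pvPatch : List Int → List Int → List Int
  | prev, [] => prev
  | [], _ :: _ => []
  | v :: prev, w :: cur => (if v = -1 ∧ w ≠ -1 then -2 else v) :: pvPatch prev cur

-- patch every row against its successor (last row stays raw)
def pvAdjust : List (List Int) → List (List Int)
  | [] => []
  | [r] => [r]
  | r :: s :: rest => pvPatch r s :: pvAdjust (s :: rest)

lemma pv_digit_not_space {c : Char} (h : PySem.Chars.isdigit c = true) :
    PySem.Int.isIntSpace c = false := by
  simp [PySem.Chars.isdigit] at h
  simp [PySem.Int.isIntSpace]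
  repeat' apply And.intro
  all_goals rintro rfl; revert h; decide

lemma pv_aux_opt (X : Option Nat) :
    (Option.map (fun n : Int => n) (do let a ← X; pure ((a : Int)))).getD 0 ≠ -1 := by
  cases X <;> simp

lemma pv_ofChars_digits {cs : List Char} (hne : cs ≠ [])
    (hall : ∀ c ∈ cs, PySem.Chars.isdigit c = true) :
    (PySem.Int.ofChars? cs).getD 0 ≠ -1 := by
  rw [PySem.Int.ofChars?]
  have hds : ∀ l : List Char, (∀ c ∈ l, PySem.Chars.isdigit c = true) →
      l.dropWhile PySem.Int.isIntSpace = l := by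
    intro l hl
    cases l with
    | nil => rfl
    | cons c t => rw [List.dropWhile_cons_of_neg]; simp [pv_digit_not_space (hl c (by simp))]
  rw [hds _ hall, hds _ (by intro c hc; exact hall c (by simpa using hc)), List.reverse_reverse]
  cases cs with
  | nil => exact absurd rfl hne
  | cons c t =>
    have hc : PySem.Chars.isdigit c = true := hall c (by simp)
    have hcm : c ≠ '-' := by rintro rfl; revert hc; decide
    have hcp : c ≠ '+' := by rintro rfl; revert hc; decide
    split
    · next ds heq => rw [List.cons.injEq] at heq; exact absurd heq.1 hcm
    · next ds heq => rw [List.cons.injEq] at heq; exact absurd heq.1 hcp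
    · exact pv_aux_opt _

lemma pvTok_eq_neg_one_iff (p : String) : pvTok p = -1 ↔ PySem.Str.strIsdigit p = false := by
  unfold pvTok
  by_cases h : PySem.Str.strIsdigit p = true
  · rw [if_pos h, h]
    simp only [Bool.true_eq_false, iff_false]
    rw [PySem.Int.ofStr?]
    have h' : PySem.Chars.strIsdigit p.toList = true := by
      rw [← PySem.Str.strIsdigit_eq]; exact h
    rw [PySem.Chars.strIsdigit] at h'
    simp only [Bool.and_eq_true, Bool.not_eq_eq_eq_not, Bool.not_true, List.isEmpty_eq_false_iff,
      List.all_eq_true] at h'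
    exact pv_ofChars_digits h'.1 h'.2
  · rw [if_neg h]
    simp at h
    simp [h]

lemma pvTok_ne_neg_one_iff (p : String) : (pvTok p ≠ -1) ↔ PySem.Str.strIsdigit p = true := by
  rw [Ne, pvTok_eq_neg_one_iff]
  simp

lemma pv_enum_mem {α : Type} {q : Int × α} {xs : List α} {k : Int}
    (h : q ∈ PySem.List.enumerate xs k) : k ≤ q.1 ∧ q.1 < k + xs.length := by
  induction xs generalizing k with
  | nil => simp [PySem.List.enumerate_nil] at h
  | cons x t ih =>
    rw [PySem.List.enumerate_cons, List.mem_cons] at h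
    rcases h with h | h
    · subst h; simp
    · have := ih h; simp; omega

lemma pvAdjust_length (xs : List (List Int)) : (pvAdjust xs).length = xs.length := by
  induction xs with
  | nil => rfl
  | cons a t ih =>
    cases t with
    | nil => rfl
    | cons b u => simp only [pvAdjust]; simpa using ih

lemma pvAdjust_ne_nil {xs : List (List Int)} (h : xs ≠ []) : pvAdjust xs ≠ [] := by
  intro hc
  apply h
  have := pvAdjust_length xs
  rw [hc] at this
  exact List.length_eq_zero_iff.mp this.symm

lemma pvAdjust_getLast? (xs : List (List Int)) : (pvAdjust xs).getLast? = xs.getLast? := by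
  induction xs with
  | nil => rfl
  | cons a t ih =>
    cases t with
    | nil => rfl
    | cons b u =>
      rw [pvAdjust.eq_3, List.getLast?_cons_cons]
      rw [show pvAdjust (b :: u) = pvAdjust (b :: u) from rfl] at ih
      cases hu : pvAdjust (b :: u) with
      | nil => exact absurd hu (pvAdjust_ne_nil (by simp))
      | cons c v => rw [List.getLast?_cons_cons, ← hu, ih]

lemma pvAdjust_snoc (xs : List (List Int)) (y : List Int) (h : xs ≠ []) :
    pvAdjust (xs ++ [y]) = (pvAdjust xs).dropLast ++ [pvPatch (xs.getLastD []) y, y] := by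
  induction xs with
  | nil => exact absurd rfl h
  | cons a t ih =>
    cases t with
    | nil => rfl
    | cons b u =>
      rw [List.cons_append, List.cons_append, pvAdjust.eq_3, ← List.cons_append,
        ih (by simp), pvAdjust.eq_3]
      simp [List.dropLast_cons_of_ne_nil (pvAdjust_ne_nil (xs := b :: u) (by simp))]

lemma pvPatch_nil_left (cur : List Int) : pvPatch [] cur = [] := by
  cases cur <;> rfl

-- one cell update, shared shape of A's inner loop
lemma pv_cell_step (prev : List Int) (j : Nat) (w : Int) (cur : List Int) :
    (if w ≠ -1 ∧ (PySem.List.pyGet? prev (j : Int)).getD 0 = -1 then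
        prev.set ((j : Int)).toNat (-2) else prev).take (j + 1)
        ++ pvPatch ((if w ≠ -1 ∧ (PySem.List.pyGet? prev (j : Int)).getD 0 = -1 then
        prev.set ((j : Int)).toNat (-2) else prev).drop (j + 1)) cur
      = prev.take j ++ pvPatch (prev.drop j) (w :: cur) := by
  rw [PySem.List.pyGet?_natCast, Int.toNat_natCast]
  by_cases hj : j < prev.length
  · rw [List.getElem?_eq_getElem hj]
    rw [List.drop_eq_getElem_cons hj, pvPatch.eq_3]
    have hset : prev.set j (-2) = prev.take j ++ -2 :: prev.drop (j + 1) := by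
      rw [List.set_eq_take_append_cons_drop, if_pos hj]
    have htk : (prev.set j (-2)).take (j + 1) = prev.take j ++ [-2] := by
      rw [hset, show j + 1 = (prev.take j).length + 1 by simp; omega, List.take_append]
      simp
    have hdr : (prev.set j (-2)).drop (j + 1) = prev.drop (j + 1) := by
      rw [hset, show j + 1 = (prev.take j).length + 1 by simp; omega, List.drop_append]
      simp
    by_cases hc : w ≠ -1 ∧ prev[j] = -1
    · rw [if_pos (by simpa using hc), if_pos ⟨hc.2, hc.1⟩, htk, hdr]
      simp
    · have htk' : List.take (j + 1) prev = List.take j prev ++ [prev[j]] := by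
        rw [← List.take_concat_get hj]; simp
      rw [if_neg (by simpa using hc), if_neg (fun hx => hc ⟨hx.2, hx.1⟩), htk']
      simp only [List.append_assoc, List.singleton_append]
  · have hnone : prev[j]? = none := by
      rw [List.getElem?_eq_none_iff]; omega
    rw [hnone, if_neg (by simp)]
    have h1 : prev.drop j = [] := List.drop_eq_nil_of_le (by omega)
    have h2 : prev.drop (j + 1) = [] := List.drop_eq_nil_of_le (by omega)
    have h3 : prev.take j = prev := List.take_of_length_le (by omega)
    have h4 : prev.take (j + 1) = prev := List.take_of_length_le (by omega)
    rw [h1, h2, h3, h4, pvPatch_nil_left, pvPatch_nil_left]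

lemma pv_insert_fresh (items : List (Int × List Int)) (k : Int) (v : List Int)
    (h : ∀ q ∈ items, q.1 ≠ k) :
    (PySem.Dict.mk items).insert k v = PySem.Dict.mk (items ++ [(k, v)]) := by
  rw [PySem.Dict.insert, if_neg]
  rw [PySem.Dict.contains]
  simp only [Bool.not_eq_true, List.any_eq_false]
  intro q hq
  simpa using h q hq

lemma pv_find_front_none {front : List (Int × List Int)} {k : Int}
    (h : ∀ q ∈ front, q.1 ≠ k) : front.find? (fun p => p.1 == k) = none := by
  rw [List.find?_eq_none]
  intro q hq
  simpa using h q hq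

lemma pv_getD_shape (front rest : List (Int × List Int)) (k : Int) (d : List Int)
    (h : ∀ q ∈ front, q.1 ≠ k) :
    (PySem.Dict.mk (front ++ rest)).getD k d = (PySem.Dict.mk rest).getD k d := by
  simp [PySem.Dict.getD, PySem.Dict.get?, List.find?_append, pv_find_front_none h]

lemma pv_contains_shape (front rest : List (Int × List Int)) (k : Int)
    (hmem : ∃ q ∈ rest, q.1 = k) :
    (PySem.Dict.mk (front ++ rest)).contains k = true := by
  obtain ⟨q, hq, hk⟩ := hmem
  refine List.any_eq_true.mpr ⟨q, ?_, by simp [hk]⟩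
  simp only [List.mem_append]
  exact Or.inr hq

lemma pv_map_front_id {front : List (Int × List Int)} {k : Int} (v : List Int)
    (h : ∀ q ∈ front, q.1 ≠ k) :
    front.map (fun p => if p.1 = k then (k, v) else p) = front := by
  conv_rhs => rw [← List.map_id front]
  apply List.map_congr_left
  intro q hq
  simp [h q hq]

lemma pv_modify_fst (front : List (Int × List Int)) (a b : Int) (x y : List Int)
    (f : List Int → List Int) (hab : a ≠ b) (h : ∀ q ∈ front, q.1 ≠ a) :
    (PySem.Dict.mk (front ++ [(a, x), (b, y)])).modify a [] f
      = PySem.Dict.mk (front ++ [(a, f x), (b, y)]) := by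
  rw [PySem.Dict.modify, pv_getD_shape _ _ _ _ h]
  rw [PySem.Dict.insert, if_pos (pv_contains_shape _ _ _ ⟨(a, x), by simp⟩)]
  simp [PySem.Dict.getD, PySem.Dict.get?, Ne.symm hab]
  exact pv_map_front_id _ h

lemma pv_modify_snd (front : List (Int × List Int)) (a b : Int) (x y : List Int)
    (f : List Int → List Int) (hab : a ≠ b) (h : ∀ q ∈ front, q.1 ≠ b) :
    (PySem.Dict.mk (front ++ [(a, x), (b, y)])).modify b [] f
      = PySem.Dict.mk (front ++ [(a, x), (b, f y)]) := by
  rw [PySem.Dict.modify, pv_getD_shape _ _ _ _ h]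
  rw [PySem.Dict.insert, if_pos (pv_contains_shape _ _ _ ⟨(b, y), by simp⟩)]
  simp [PySem.Dict.getD, PySem.Dict.get?, hab]
  exact pv_map_front_id _ h

-- one token of A's inner loop, on a dict of the invariant shape
lemma pv_step_shape (r : Int) (hr : 0 < r) (front : List (Int × List Int))
    (prev done : List Int) (j : Nat) (p : String)
    (hf : ∀ q ∈ front, q.1 ≠ r - 1 ∧ q.1 ≠ r) :
    pvStepTok r (PySem.Dict.mk (front ++ [(r - 1, prev), (r, done)])) ((j : Int), p)
      = PySem.Dict.mk (front ++
          [(r - 1, if pvTok p ≠ -1 ∧ (PySem.List.pyGet? prev (j : Int)).getD 0 = -1 then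
              prev.set ((j : Int)).toNat (-2) else prev),
           (r, done ++ [pvTok p])]) := by
  have hrr : r - 1 ≠ r := by omega
  have h1 : ∀ q ∈ front, q.1 ≠ r - 1 := fun q hq => (hf q hq).1
  have h2 : ∀ q ∈ front, q.1 ≠ r := fun q hq => (hf q hq).2
  unfold pvStepTok
  rw [if_pos hr]
  rw [pv_getD_shape _ _ _ _ h1]
  have hget : (PySem.Dict.mk [(r - 1, prev), (r, done)]).getD (r - 1) [] = prev := by
    simp [PySem.Dict.getD, PySem.Dict.get?]
  rw [hget]
  by_cases hc : (PySem.List.pyGet? prev (j : Int)).getD 0 = -1 ∧ PySem.Str.strIsdigit p = true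
  · rw [if_pos hc, if_pos (by rw [pvTok_ne_neg_one_iff]; exact ⟨hc.2, hc.1⟩)]
    rw [pv_modify_fst _ _ _ _ _ _ hrr h1, pv_modify_snd _ _ _ _ _ _ hrr h2]
  · rw [if_neg hc,
      if_neg (by rw [pvTok_ne_neg_one_iff]; intro hx; exact hc ⟨hx.2, hx.1⟩)]
    rw [pv_modify_snd _ _ _ _ _ _ hrr h2]

-- A's inner loop on a dict of shape front ++ [(r-1, prev), (r, done)]
lemma pvStepTok_inner (r : Int) (hr : 0 < r) (toks : List String) :
    ∀ (j : Nat) (front : List (Int × List Int)) (prev done : List Int),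
    (∀ q ∈ front, q.1 ≠ r - 1 ∧ q.1 ≠ r) →
    (PySem.List.enumerate toks (j : Int)).foldl (pvStepTok r)
        (PySem.Dict.mk (front ++ [(r - 1, prev), (r, done)]))
      = PySem.Dict.mk (front ++ [(r - 1, prev.take j ++ pvPatch (prev.drop j) (toks.map pvTok)),
                                 (r, done ++ toks.map pvTok)]) := by
  induction toks with
  | nil =>
    intro j front prev done hf
    simp [PySem.List.enumerate_nil, pvPatch.eq_1, List.take_append_drop]
  | cons p ps ih =>
    intro j front prev done hf
    rw [PySem.List.enumerate_cons, List.foldl_cons, pv_step_shape r hr front prev done j p hf,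
      show ((j : Int) + 1) = ((j + 1 : Nat) : Int) by push_cast; ring,
      ih (j + 1) front _ _ hf]
    rw [List.map_cons, pv_cell_step prev j (pvTok p) (ps.map pvTok)]
    simp

-- A's inner loop for row 0
lemma pv_modify_single (x : List Int) (f : List Int → List Int) :
    (PySem.Dict.mk [((0 : Int), x)]).modify 0 [] f = PySem.Dict.mk [((0 : Int), f x)] := by
  simp [PySem.Dict.modify, PySem.Dict.insert, PySem.Dict.getD, PySem.Dict.get?,
    PySem.Dict.contains]

lemma pvStepTok_inner0 (toks : List String) : ∀ (j : Nat) (done : List Int),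
    (PySem.List.enumerate toks (j : Int)).foldl (pvStepTok 0) (PySem.Dict.mk [(0, done)])
      = PySem.Dict.mk [(0, done ++ toks.map pvTok)] := by
  induction toks with
  | nil => intro j done; simp [PySem.List.enumerate_nil]
  | cons p ps ih =>
    intro j done
    rw [PySem.List.enumerate_cons, List.foldl_cons,
      show pvStepTok 0 (PySem.Dict.mk [(0, done)]) ((j : Int), p)
          = PySem.Dict.mk [(0, done ++ [pvTok p])] by
        unfold pvStepTok; rw [if_neg (by omega)]; exact pv_modify_single _ _,
      show ((j : Int) + 1) = ((j + 1 : Nat) : Int) by push_cast; ring, ih (j + 1)]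
    simp

-- A's outer loop invariant
lemma pvStepRow_outer (rest : List String) :
    ∀ (pre : List String), pre ≠ [] →
    (PySem.List.enumerate rest (pre.length : Int)).foldl pvStepRow
        (PySem.Dict.mk (PySem.List.enumerate (pvAdjust (pre.map pvRowVals)) 0))
      = PySem.Dict.mk (PySem.List.enumerate (pvAdjust ((pre ++ rest).map pvRowVals)) 0) := by
  induction rest with
  | nil => intro pre _; simp [PySem.List.enumerate_nil]
  | cons line rest' ih =>
    intro pre hpre
    have hn : 1 ≤ pre.length := by
      cases pre with
      | nil => exact absurd rfl hpre
      | cons _ _ => simp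
    set M := pvAdjust (pre.map pvRowVals) with hM
    have hMlen : M.length = pre.length := by
      rw [hM, pvAdjust_length, List.length_map]
    have hMne : M ≠ [] := by
      rw [hM]
      exact pvAdjust_ne_nil (by simpa using hpre)
    rw [PySem.List.enumerate_cons, List.foldl_cons]
    have hstep : pvStepRow (PySem.Dict.mk (PySem.List.enumerate M 0)) ((pre.length : Int), line)
        = PySem.Dict.mk (PySem.List.enumerate (pvAdjust ((pre ++ [line]).map pvRowVals)) 0) := by
      unfold pvStepRow
      rw [pv_insert_fresh _ _ _ (by
        intro q hq
        have := pv_enum_mem hq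
        rw [hMlen] at this
        omega)]
      have hsplit : PySem.List.enumerate M 0
          = PySem.List.enumerate M.dropLast 0
            ++ [((M.dropLast.length : Int), M.getLast hMne)] := by
        conv_lhs => rw [← List.dropLast_append_getLast hMne]
        rw [PySem.List.enumerate_append, PySem.List.enumerate_cons, PySem.List.enumerate_nil]
        norm_num
      have hk : ((M.dropLast.length : Int)) = (pre.length : Int) - 1 := by
        simp [hMlen]
        omega
      rw [hsplit, hk, List.append_assoc, List.cons_append, List.nil_append]
      rw [show (0 : Int) = ((0 : Nat) : Int) from rfl,
        pvStepTok_inner (pre.length : Int) (by exact_mod_cast hn) _ 0 _ _ _ (by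
          intro q hq
          have h1 := pv_enum_mem hq
          have h2 : (0 : Int) ≤ q.1 ∧ q.1 < (M.dropLast.length : Int) := by
            constructor <;> [exact h1.1; simpa using h1.2]
          rw [hk] at h2
          constructor <;> omega)]
      have hlast : M.getLast hMne = (pre.map pvRowVals).getLastD [] := by
        rw [List.getLastD_eq_getLast?, ← pvAdjust_getLast?, ← hM,
          List.getLast?_eq_some_getLast hMne]
        rfl
      rw [List.take_zero, List.drop_zero, List.nil_append, List.nil_append, hlast]
      rw [show (pre ++ [line]).map pvRowVals = pre.map pvRowVals ++ [pvRowVals line] by simp,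
        pvAdjust_snoc _ _ (by simpa using hpre), ← hM, PySem.List.enumerate_append,
        PySem.List.enumerate_cons, PySem.List.enumerate_cons, PySem.List.enumerate_nil, hk]
      have hvals : pvRowVals line = ((PySem.Str.split? line " ").getD []).map pvTok := rfl
      rw [hvals]
      norm_num
    rw [hstep, show ((pre.length : Int) + 1) = (((pre ++ [line]).length : Nat) : Int) by
      push_cast [List.length_append]
      simp]
    rw [ih (pre ++ [line]) (by simp)]
    congr 2
    simp

theorem decode_layout_model (layout : List String) :
    decode_layout layout = PySem.List.enumerate (pvAdjust (layout.map pvRowVals)) 0 := by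
  unfold decode_layout
  cases layout with
  | nil => rfl
  | cons l0 rest =>
    rw [PySem.List.enumerate_cons, List.foldl_cons]
    have hfirst : pvStepRow PySem.Dict.empty ((0 : Int), l0)
        = PySem.Dict.mk (PySem.List.enumerate (pvAdjust ([l0].map pvRowVals)) 0) := by
      unfold pvStepRow
      dsimp only
      rw [show (PySem.Dict.empty : PySem.Dict Int (List Int)) = PySem.Dict.mk [] from rfl,
        pv_insert_fresh _ _ _ (by simp), List.nil_append]
      have h0 := pvStepTok_inner0 ((PySem.Str.split? l0 " ").getD []) 0 []
      norm_num at h0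
      rw [h0]
      rfl
    rw [hfirst, show (0 : Int) + 1 = (([l0].length : Nat) : Int) by simp,
      pvStepRow_outer rest [l0] (by simp)]
    simp

-- B's cell rule equals the model's patch cell
lemma pvCellB_some (p q : String) :
    pvCellB p (some q) = if pvTok p = -1 ∧ pvTok q ≠ -1 then -2 else pvTok p := by
  have hp := pvTok_eq_neg_one_iff p
  have hq := pvTok_ne_neg_one_iff q
  unfold pvCellB
  by_cases h1 : PySem.Str.strIsdigit p = true
  · rw [if_pos h1, if_neg (by rintro ⟨hv, _⟩; rw [hp, h1] at hv; simp at hv)]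
    unfold pvTok; rw [if_pos h1]
  · rw [if_neg h1]
    by_cases h2 : PySem.Str.strIsdigit q = true
    · rw [if_pos (by simpa using h2), if_pos ⟨hp.mpr (by simpa using h1), hq.mpr h2⟩]
    · rw [if_neg (by simpa using h2), if_neg (by rintro ⟨_, hw⟩; exact h2 (hq.mp hw))]
      unfold pvTok; rw [if_neg h1]

lemma pvCellB_none (p : String) : pvCellB p none = pvTok p := by
  unfold pvCellB pvTok
  by_cases hp : PySem.Str.strIsdigit p = true
  · rw [if_pos hp, if_pos hp]
  · rw [if_neg hp, if_neg hp, if_neg (by simp)]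

-- B's inner comprehension is pvPatch of this row against the row below
lemma pv_rowB (cur : List String) : ∀ (j : Nat) (below : List String),
    (PySem.List.enumerate cur (j : Int)).map (fun ip =>
        pvCellB ip.2 (if ip.1 < (below.length : Int) then PySem.List.pyGet? below ip.1 else none))
      = pvPatch (cur.map pvTok) ((below.drop j).map pvTok) := by
  induction cur with
  | nil =>
    intro j below
    rw [PySem.List.enumerate_nil, List.map_nil, List.map_nil, pvPatch_nil_left]
  | cons p ps ih =>
    intro j below
    rw [PySem.List.enumerate_cons, List.map_cons,
      show ((j : Int) + 1) = ((j + 1 : Nat) : Int) by push_cast; ring, ih (j + 1) below]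
    dsimp only
    by_cases hj : j < below.length
    · have hget : PySem.List.pyGet? below (j : Int) = some below[j] := by
        rw [PySem.List.pyGet?_natCast, List.getElem?_eq_getElem hj]
      rw [if_pos (by exact_mod_cast hj), hget,
        List.drop_eq_getElem_cons hj, List.map_cons, List.map_cons, pvPatch.eq_3,
        pvCellB_some]
    · have h1 : below.drop j = [] := List.drop_eq_nil_of_le (by omega)
      have h2 : below.drop (j + 1) = [] := List.drop_eq_nil_of_le (by omega)
      rw [if_neg (by omega), h1, h2, List.map_nil, pvCellB_none,
        pvPatch.eq_1, pvPatch.eq_1, List.map_cons]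

lemma pv_rowB0 (cur below : List String) :
    (PySem.List.enumerate cur).map (fun ip =>
        pvCellB ip.2 (if ip.1 < (below.length : Int) then PySem.List.pyGet? below ip.1 else none))
      = pvPatch (cur.map pvTok) (below.map pvTok) := by
  have h := pv_rowB cur 0 below
  simpa using h

-- B's outer comprehension over a suffix of the token table
lemma pv_outerB (T : List (List String)) (s : List (List String)) : ∀ (j : Nat), T.drop j = s →
    (PySem.List.enumerate s (j : Int)).map (fun rp =>
        (rp.1, (PySem.List.enumerate rp.2).map (fun ip =>
          pvCellB ip.2 (if ip.1 <
              (((if rp.1 + 1 < (T.length : Int) then (PySem.List.pyGet? T (rp.1 + 1)).getD []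
                else []).length : Nat) : Int) then
            PySem.List.pyGet? (if rp.1 + 1 < (T.length : Int) then
              (PySem.List.pyGet? T (rp.1 + 1)).getD [] else []) ip.1
            else none))))
      = PySem.List.enumerate (pvAdjust (s.map (fun r => r.map pvTok))) (j : Int) := by
  induction s with
  | nil => intro j _; rw [PySem.List.enumerate_nil, List.map_nil]; rfl
  | cons cur s' ih =>
    intro j hdrop
    have hdrop' : T.drop (j + 1) = s' := by
      have h0 : T.drop (j + 1) = (T.drop j).drop 1 := by
        rw [List.drop_drop]
      rw [h0, hdrop, List.drop_one, List.tail_cons]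
    rw [PySem.List.enumerate_cons, List.map_cons]
    dsimp only
    cases s' with
    | nil =>
      have hout : ¬ ((j : Int) + 1 < (T.length : Int)) := by
        have : T.length ≤ j + 1 := by
          by_contra hc
          have := List.drop_eq_nil_iff.mp hdrop'
          omega
        omega
      simp only [hout, if_false]
      rw [pv_rowB0 cur []]
      simp [pvPatch.eq_1, pvAdjust, PySem.List.enumerate_cons, PySem.List.enumerate_nil]
    | cons nxt s'' =>
      have hin : j + 1 < T.length := by
        by_contra hc
        rw [List.drop_eq_nil_of_le (by omega)] at hdrop'
        exact (List.cons_ne_nil _ _) hdrop'.symm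
      have hTj : T[(j + 1 : Nat)]? = some nxt := by
        have h0 : (List.drop (j + 1) T)[0]? = T[(j + 1) + 0]? := List.getElem?_drop
        rw [hdrop'] at h0
        simpa using h0.symm
      have hbelow : (if (j : Int) + 1 < (T.length : Int) then
          (PySem.List.pyGet? T ((j : Int) + 1)).getD [] else []) = nxt := by
        rw [if_pos (by omega),
          show ((j : Int) + 1) = ((j + 1 : Nat) : Int) by push_cast; ring,
          PySem.List.pyGet?_natCast, hTj]
        rfl
      simp only [hbelow]
      rw [pv_rowB0 cur nxt]
      rw [show ((j : Int) + 1) = ((j + 1 : Nat) : Int) by push_cast; ring, ih (j + 1) hdrop']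
      simp only [List.map_cons, pvAdjust.eq_3, PySem.List.enumerate_cons]
      push_cast
      rfl

theorem decode_layout_alt_model (layout : List String) :
    decode_layout_alt layout = PySem.List.enumerate (pvAdjust (layout.map pvRowVals)) 0 := by
  unfold decode_layout_alt
  dsimp only
  have h := pv_outerB (layout.map (fun line => (PySem.Str.split? line " ").getD []))
      (layout.map (fun line => (PySem.Str.split? line " ").getD [])) 0 (by rw [List.drop_zero])
  simp only [Nat.cast_zero] at h
  rw [h, List.map_map]
  rfl

-- ===== VERDICT (by name: the statement is the Claim_ definition above) =====
theorem decode_layout_spec : Claim_equal_decode_layout := by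
  intro layout _ _
  unfold Spec_decode_layout
  rw [decode_layout_model, decode_layout_alt_model]
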